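-- pv_equiv track=rewrite | github.com/starreeze/geocap | data/caption/caption.py | decide_abs_pos
-- ===== SOURCE A (Python) =====
-- def decide_abs_pos(center_positions, x1, x2, y1, y2):
--     abs_positions = []
--     for center in center_positions:
--         x = center[0]
--         y = center[1]
--         if x < x1:
--             if y < y1:
--                 abs_positions.append("bottom-left")
--             elif y <= y2:
--                 abs_positions.append("left")
--             else:
--                 abs_positions.append("top-left")
--         elif x <= x2:
--             if y < y1:
--                 abs_positions.append("bottom")
--             elif y <= y2:
--                 abs_positions.append("center")
--             else:
--                 abs_positions.append("top")
--         else: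
--             if y < y1:
--                 abs_positions.append("bottom-right")
--             elif y <= y2:
--                 abs_positions.append("right")
--             else:
--                 abs_positions.append("top-right")
--     return abs_positions
-- ===== SOURCE B (Python) =====
-- def decide_abs_pos(center_positions, x1, x2, y1, y2):
--     # Staged: build the vertical and horizontal words separately, then join.
--     vert = ["bottom" if y < y1 else ("" if y <= y2 else "top") for _, y in center_positions]
--     horz = ["left" if x < x1 else ("" if x <= x2 else "right") for x, _ in center_positions]
--     return [v + "-" + h if v and h else (v or h or "center") for v, h in zip(vert, horz)]
-- ===== Notes on version B (the rewrite author's own statement) =====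
-- stated objective: alternative
-- what changed: Builds each label compositionally from independently computed vertical and horizontal words joined with '-' (falling back to 'center'), in two staged passes zipped together, instead of a single loop with a nine-way nested branch.
import Mathlib
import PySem

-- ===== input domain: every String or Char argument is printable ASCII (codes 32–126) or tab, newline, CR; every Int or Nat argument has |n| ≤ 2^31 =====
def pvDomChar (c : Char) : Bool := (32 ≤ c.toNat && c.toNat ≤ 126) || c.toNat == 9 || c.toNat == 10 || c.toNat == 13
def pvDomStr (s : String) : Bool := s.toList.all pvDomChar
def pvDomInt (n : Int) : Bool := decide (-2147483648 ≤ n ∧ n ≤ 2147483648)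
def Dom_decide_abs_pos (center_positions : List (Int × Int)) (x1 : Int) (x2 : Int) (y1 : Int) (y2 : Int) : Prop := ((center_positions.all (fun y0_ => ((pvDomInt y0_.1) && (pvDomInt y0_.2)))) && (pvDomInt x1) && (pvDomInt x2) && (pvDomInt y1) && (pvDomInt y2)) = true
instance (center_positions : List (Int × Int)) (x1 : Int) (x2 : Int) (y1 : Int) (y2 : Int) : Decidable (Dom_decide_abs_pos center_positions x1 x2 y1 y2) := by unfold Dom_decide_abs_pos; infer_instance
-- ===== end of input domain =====

-- B builds each label compositionally (vertical word + '-' + horizontal word, 'center' fallback)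
-- in two staged passes zipped together, instead of A's single loop with a nine-way nested branch.

-- ===== PORT A =====
def decide_abs_pos (center_positions : List (Int × Int)) (x1 : Int) (x2 : Int) (y1 : Int) (y2 : Int) : List String :=
  center_positions.foldl (fun abs_positions center =>
    let x := center.1
    let y := center.2
    if x < x1 then
      (if y < y1 then abs_positions ++ ["bottom-left"]
       else if y ≤ y2 then abs_positions ++ ["left"]
       else abs_positions ++ ["top-left"])
    else if x ≤ x2 then
      (if y < y1 then abs_positions ++ ["bottom"]
       else if y ≤ y2 then abs_positions ++ ["center"]
       else abs_positions ++ ["top"])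
    else
      (if y < y1 then abs_positions ++ ["bottom-right"]
       else if y ≤ y2 then abs_positions ++ ["right"]
       else abs_positions ++ ["top-right"])) []

-- ===== PORT B =====
def decide_abs_pos_alt (center_positions : List (Int × Int)) (x1 : Int) (x2 : Int) (y1 : Int) (y2 : Int) : List String :=
  let vert := center_positions.map (fun c => if c.2 < y1 then "bottom" else if c.2 ≤ y2 then "" else "top")
  let horz := center_positions.map (fun c => if c.1 < x1 then "left" else if c.1 ≤ x2 then "" else "right")
  List.zipWith (fun v h =>
    if v ≠ "" ∧ h ≠ "" then v ++ "-" ++ h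
    else if v ≠ "" then v else if h ≠ "" then h else "center") vert horz

-- ===== PRECONDITION & SPEC =====
def Spec_decide_abs_pos (center_positions : List (Int × Int)) (x1 : Int) (x2 : Int) (y1 : Int) (y2 : Int) (out : List String) : Prop := out = decide_abs_pos_alt center_positions x1 x2 y1 y2
instance (center_positions : List (Int × Int)) (x1 : Int) (x2 : Int) (y1 : Int) (y2 : Int) (out : List String) : Decidable (Spec_decide_abs_pos center_positions x1 x2 y1 y2 out) := by unfold Spec_decide_abs_pos; infer_instance

-- ===== CLAIM (what is proved, stated in full; the proofs are below) =====
def Claim_equal_decide_abs_pos : Prop := ∀ (center_positions : List (Int × Int)) (x1 : Int) (x2 : Int) (y1 : Int) (y2 : Int), Dom_decide_abs_pos center_positions x1 x2 y1 y2 → Spec_decide_abs_pos center_positions x1 x2 y1 y2 (decide_abs_pos center_positions x1 x2 y1 y2)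

-- ===== LEMMAS AND PROOFS =====

-- zipping the two staged maps over the same list is a single map of the pointwise combination
theorem zipWith_map_same {α β γ δ : Type} (f : α → β) (g : α → γ) (h : β → γ → δ) (l : List α) :
    List.zipWith h (l.map f) (l.map g) = l.map (fun a => h (f a) (g a)) := by
  induction l with
  | nil => rfl
  | cons a t ih => simp [ih]

theorem decide_abs_pos_spec : Claim_equal_decide_abs_pos := by
  intro cps x1 x2 y1 y2 _
  unfold Spec_decide_abs_pos decide_abs_pos decide_abs_pos_alt
  simp only [zipWith_map_same]
  rw [PySem.List.foldl_congr_mem (g := fun (acc : List String) (c : Int × Int) => acc ++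
      [if c.1 < x1 then
        (if c.2 < y1 then "bottom-left" else if c.2 ≤ y2 then "left" else "top-left")
       else if c.1 ≤ x2 then
        (if c.2 < y1 then "bottom" else if c.2 ≤ y2 then "center" else "top")
       else
        (if c.2 < y1 then "bottom-right" else if c.2 ≤ y2 then "right" else "top-right")])
      (h := by intro acc c _; dsimp only; split_ifs <;> rfl),
    PySem.List.foldl_append_singleton_eq_map]
  simp only [List.nil_append]
  apply List.map_congr_left
  intro c _
  dsimp only
  split_ifs <;> first | rfl | omega | simp_all
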